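-- pv_equiv track=rewrite | github.com/rohit9604-bit/CodeMaster | Backend/test_prob3.py | solve
-- ===== SOURCE A (Python) =====
-- def solve(nums):
--     ans = 0
--     freq = {(0, 1): 1}
--     prefix = 0
--
--     for j in range(len(nums)):
--         if nums[j] > 0:
--             prefix += 1
--         elif nums[j] < 0:
--             prefix -= 1
--
--         target_parity = j % 2
--         state = (prefix, target_parity)
--
--         ans += freq.get(state, 0)
--         freq[state] = freq.get(state, 0) + 1
--
--     return ans
-- ===== SOURCE B (Python) =====
-- def solve(nums):
--     n = len(nums)
--     ans = 0
--     for i in range(n):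
--         s = 0
--         for j in range(i, n):
--             x = nums[j]
--             if x > 0:
--                 s += 1
--             elif x < 0:
--                 s -= 1
--             if s == 0 and (j - i + 1) % 2 == 0:
--                 ans += 1
--     return ans
-- ===== Notes on version B (the rewrite author's own statement) =====
-- stated objective: simpler
-- what changed: Replaced A's one-pass prefix-state hashmap (dict keyed by (prefix sign-sum, index parity)) with a plain nested scan that, for each start index, extends a running sign-sum and counts even-length zero-sum subarrays directly.
import Mathlib
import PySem

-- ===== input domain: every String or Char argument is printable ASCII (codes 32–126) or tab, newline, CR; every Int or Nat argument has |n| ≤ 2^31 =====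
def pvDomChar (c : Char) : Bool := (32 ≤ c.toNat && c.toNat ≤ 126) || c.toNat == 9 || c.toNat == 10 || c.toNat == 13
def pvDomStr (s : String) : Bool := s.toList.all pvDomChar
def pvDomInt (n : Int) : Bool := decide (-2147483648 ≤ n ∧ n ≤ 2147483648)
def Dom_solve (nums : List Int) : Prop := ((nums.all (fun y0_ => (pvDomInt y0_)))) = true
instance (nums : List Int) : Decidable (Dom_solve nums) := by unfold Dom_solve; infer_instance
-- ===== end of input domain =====

-- B replaces A's prefix-state hashmap with a plain nested scan over all subarrays
-- (running sign-sum per start index); objective: simpler — no dict, no prefix-parity encoding.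

-- ===== PORT A =====
-- one loop step of A: state = (ans, freq, pfx), input = (j, nums[j])
def stepA (st : Int × PySem.Dict (Int × Int) Int × Int) (jx : Int × Int) : Int × PySem.Dict (Int × Int) Int × Int :=
  let pfx := if jx.2 > 0 then st.2.2 + 1 else if jx.2 < 0 then st.2.2 - 1 else st.2.2
  let state : Int × Int := (pfx, PySem.Int.mod jx.1 2)
  let ans := st.1 + st.2.1.getD state 0
  let freq := st.2.1.insert state (st.2.1.getD state 0 + 1)
  (ans, freq, pfx)

def solve (nums : List Int) : Int :=
  ((PySem.List.pyRange 0 (PySem.List.len nums) 1).foldl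
    (fun st j => stepA st (j, PySem.List.pyGetD nums j 0))
    (0, PySem.Dict.ofList [((0, 1), 1)], 0)).1

-- ===== PORT B =====
-- one step of B's inner loop: state = (s, length, ans)
def stepB (st : Int × Int × Int) (x : Int) : Int × Int × Int :=
  let s := if x > 0 then st.1 + 1 else if x < 0 then st.1 - 1 else st.1
  let len := st.2.1 + 1
  let ans := if s = 0 ∧ PySem.Int.mod len 2 = 0 then st.2.2 + 1 else st.2.2
  (s, len, ans)

def solve_alt (nums : List Int) : Int :=
  (PySem.List.pyRange 0 (PySem.List.len nums) 1).foldl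
    (fun ans i => ((PySem.List.slice nums (some i) none).foldl stepB (0, 0, ans)).2.2) 0

-- ===== PRECONDITION & SPEC =====
def Spec_solve (nums : List Int) (out : Int) : Prop := out = solve_alt nums
instance (nums : List Int) (out : Int) : Decidable (Spec_solve nums out) := by unfold Spec_solve; infer_instance

-- ===== CLAIM (what is proved, stated in full; the proofs are below) =====
def Claim_equal_solve : Prop := ∀ (nums : List Int), Dom_solve nums → Spec_solve nums (solve nums)

-- ===== LEMMAS AND PROOFS =====

-- sign of an element, and sign-sum of a list
def sgn (x : Int) : Int := if x > 0 then 1 else if x < 0 then -1 else 0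
def ssum (l : List Int) : Int := (l.map sgn).sum

-- number of nonempty even-length zero-sign-sum prefixes of l
def gp (l : List Int) : Int :=
  ((List.range l.length).countP
    (fun k => decide (ssum (l.take (k + 1)) = 0 ∧ ((k : Int) + 1) % 2 = 0)) : Int)

-- number of nonempty even-length zero-sign-sum subarrays of l
def cnt (l : List Int) : Int := ((List.range l.length).map (fun k => gp (l.drop k))).sum

-- spec of A's freq dict entry at key (p, b)
def fcnt (l : List Int) (p b : Int) : Int :=
  (if p = 0 ∧ b = 1 then 1 else 0) +
  ((List.range l.length).countP
    (fun k => decide (ssum (l.take (k + 1)) = p ∧ (k : Int) % 2 = b)) : Int)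

theorem fmod_two (a : Int) : PySem.Int.mod a 2 = a % 2 := by
  simp [PySem.Int.mod, Int.fmod_eq_emod]

theorem ssum_append (l : List Int) (x : Int) : ssum (l ++ [x]) = ssum l + sgn x := by
  simp [ssum]

theorem ssum_take_drop (l : List Int) (k : Nat) : ssum (l.take k) + ssum (l.drop k) = ssum l := by
  conv_rhs => rw [← List.take_append_drop k l]
  simp [ssum]

theorem sgn_step (s x : Int) :
    (if x > 0 then s + 1 else if x < 0 then s - 1 else s) = s + sgn x := by
  unfold sgn; split_ifs <;> omega

theorem gp_append (l : List Int) (x : Int) :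
    gp (l ++ [x]) = gp l + (if ssum (l ++ [x]) = 0 ∧ ((l.length : Int) + 1) % 2 = 0 then 1 else 0) := by
  have hc : List.countP
      (fun k => decide (ssum ((l ++ [x]).take (k + 1)) = 0 ∧ ((k : Int) + 1) % 2 = 0))
      (List.range l.length) =
    List.countP
      (fun k => decide (ssum (l.take (k + 1)) = 0 ∧ ((k : Int) + 1) % 2 = 0))
      (List.range l.length) := by
    apply List.countP_congr
    intro k hk
    have hk' : k + 1 ≤ l.length := by have := List.mem_range.mp hk; omega
    rw [List.take_append_of_le_length hk']
  have ht : (l ++ [x]).take (l.length + 1) = l ++ [x] := by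
    apply List.take_of_length_le; simp
  simp only [gp, List.length_append, List.length_singleton, List.range_succ,
    List.countP_append, hc, ht, List.countP_cons, List.countP_nil]
  by_cases h : ssum (l ++ [x]) = 0 ∧ ((l.length : Int) + 1) % 2 = 0
  · simp [h.1, h.2]
  · simp only [if_neg h]
    simp
    omega

theorem gp_nil : gp [] = 0 := by simp [gp]

-- B's inner fold computes (sign-sum, length, ans + gp)
theorem stepB_fold (l : List Int) (a : Int) :
    l.foldl stepB (0, 0, a) = (ssum l, (l.length : Int), a + gp l) := by
  induction l using List.reverseRecOn with
  | nil => simp [ssum, gp_nil]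
  | append_singleton l x ih =>
    rw [List.foldl_append, ih, List.foldl_cons, List.foldl_nil]
    simp only [stepB, fmod_two, sgn_step, ← ssum_append]
    rw [gp_append]
    simp only [Prod.mk.injEq]
    refine ⟨trivial, by simp, ?_⟩
    split_ifs <;> ring

-- key counting lemma: extending every subarray end by x
theorem cnt_append (l : List Int) (x : Int) :
    cnt (l ++ [x]) = cnt l + fcnt l (ssum (l ++ [x])) ((l.length : Int) % 2) := by
  have h1 : ((List.range (l.length + 1)).map (fun k => gp ((l ++ [x]).drop k))).sum
      = ((List.range (l.length + 1)).map (fun k => gp (l.drop k) +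
          (if ssum (l.drop k) + sgn x = 0 ∧ (((l.length - k : Nat) : Int) + 1) % 2 = 0
           then 1 else 0))).sum := by
    apply congrArg
    apply List.map_congr_left
    intro k hk
    have hk' : k ≤ l.length := by have := List.mem_range.mp hk; omega
    rw [List.drop_append_of_le_length hk', gp_append, ssum_append, List.length_drop]
  have h2 : ((List.range (l.length + 1)).map (fun k => gp (l.drop k))).sum = cnt l := by
    simp [List.range_succ, cnt, gp_nil]
  have h3 : ((List.range (l.length + 1)).map (fun k =>
        (if ssum (l.drop k) + sgn x = 0 ∧ (((l.length - k : Nat) : Int) + 1) % 2 = 0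
         then (1 : Int) else 0))).sum
      = fcnt l (ssum (l ++ [x])) ((l.length : Int) % 2) := by
    rw [List.range_succ_eq_map, List.map_cons, List.map_map, List.sum_cons]
    unfold fcnt
    rw [← PySem.List.sum_map_ite_one_zero]
    congr 1
    · rw [ssum_append]
      apply if_congr _ rfl rfl
      constructor
      · rintro ⟨hs, hp⟩
        refine ⟨by simpa using hs, by simp at hp ⊢; omega⟩
      · rintro ⟨hs, hp⟩
        refine ⟨by simpa using hs, by simp at hp ⊢; omega⟩
    · apply congrArg
      apply List.map_congr_left
      intro k hk
      have hk' : k < l.length := List.mem_range.mp hk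
      have hts := ssum_take_drop l (k + 1)
      simp only [Function.comp, Nat.succ_eq_add_one, decide_eq_true_eq, ssum_append]
      apply if_congr _ rfl rfl
      constructor
      · rintro ⟨hs, hp⟩
        exact ⟨by omega, by omega⟩
      · rintro ⟨hs, hp⟩
        exact ⟨by omega, by omega⟩
  calc cnt (l ++ [x])
      = ((List.range (l.length + 1)).map (fun k => gp ((l ++ [x]).drop k))).sum := by
        simp [cnt]
    _ = cnt l + fcnt l (ssum (l ++ [x])) ((l.length : Int) % 2) := by
        rw [h1, PySem.List.sum_map_add_int, h2, h3]

theorem fcnt_append (l : List Int) (x : Int) (p b : Int) :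
    fcnt (l ++ [x]) p b =
      (if (p, b) = (ssum (l ++ [x]), (l.length : Int) % 2) then fcnt l p b + 1 else fcnt l p b) := by
  have hc : List.countP
      (fun k => decide (ssum ((l ++ [x]).take (k + 1)) = p ∧ (k : Int) % 2 = b))
      (List.range l.length) =
    List.countP
      (fun k => decide (ssum (l.take (k + 1)) = p ∧ (k : Int) % 2 = b))
      (List.range l.length) := by
    apply List.countP_congr
    intro k hk
    have hk' : k + 1 ≤ l.length := by have := List.mem_range.mp hk; omega
    rw [List.take_append_of_le_length hk']
  have ht : (l ++ [x]).take (l.length + 1) = l ++ [x] := by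
    apply List.take_of_length_le; simp
  simp only [fcnt, List.length_append, List.length_singleton, List.range_succ,
    List.countP_append, hc, ht, List.countP_cons, List.countP_nil, Prod.mk.injEq]
  by_cases h : ssum (l ++ [x]) = p ∧ ((l.length : Int)) % 2 = b
  · simp [h.1, h.2]; ring
  · have h' : ¬ (p = ssum (l ++ [x]) ∧ b = (l.length : Int) % 2) := by
      rintro ⟨h1, h2⟩; exact h ⟨h1.symm, h2.symm⟩
    simp [h, h']

theorem fcnt_nil (p b : Int) :
    (PySem.Dict.ofList [((0, 1), 1)] : PySem.Dict (Int × Int) Int).getD (p, b) 0 = fcnt [] p b := by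
  simp only [fcnt, List.length_nil, List.range_zero, List.countP_nil]
  by_cases h : p = 0 ∧ b = 1
  · simp [h.1, h.2]; decide
  · have : ((p, b) : Int × Int) ≠ (0, 1) := by
      intro hc; exact h (by simpa [Prod.ext_iff] using hc)
    simp [PySem.Dict.ofList, PySem.Dict.update, PySem.Dict.getD_insert, h, this]

-- A's loop invariant over the processed prefix
theorem A_invariant (l : List Int) :
    ((PySem.List.enumerate l 0).foldl stepA (0, PySem.Dict.ofList [((0, 1), 1)], 0)).1 = cnt l ∧
    ((PySem.List.enumerate l 0).foldl stepA (0, PySem.Dict.ofList [((0, 1), 1)], 0)).2.2 = ssum l ∧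
    ∀ p b, ((PySem.List.enumerate l 0).foldl stepA (0, PySem.Dict.ofList [((0, 1), 1)], 0)).2.1.getD (p, b) 0 = fcnt l p b := by
  induction l using List.reverseRecOn with
  | nil =>
    refine ⟨by simp [PySem.List.enumerate, cnt], by simp [PySem.List.enumerate, ssum], ?_⟩
    intro p b
    simpa [PySem.List.enumerate] using fcnt_nil p b
  | append_singleton l x ih =>
    obtain ⟨ia, is, id⟩ := ih
    have he : PySem.List.enumerate (l ++ [x]) 0
        = PySem.List.enumerate l 0 ++ [((l.length : Int), x)] := by
      rw [PySem.List.enumerate_append]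
      simp [PySem.List.enumerate_cons, PySem.List.enumerate_nil]
    rw [he, List.foldl_append, List.foldl_cons, List.foldl_nil]
    set st := (PySem.List.enumerate l 0).foldl stepA (0, PySem.Dict.ofList [((0, 1), 1)], 0) with hst
    have hpfx : (if x > 0 then st.2.2 + 1 else if x < 0 then st.2.2 - 1 else st.2.2)
        = ssum (l ++ [x]) := by rw [is, sgn_step, ssum_append]
    refine ⟨?_, ?_, ?_⟩
    · simp only [stepA, hpfx, fmod_two]
      rw [ia, id, cnt_append]
    · simp only [stepA, hpfx]
    · intro p b
      simp only [stepA, hpfx, fmod_two]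
      rw [PySem.Dict.getD_insert, id, fcnt_append, id]
      split_ifs with hpb
      · rw [Prod.mk.injEq] at hpb
        rw [hpb.1, hpb.2]
      · rfl

theorem solve_eq_cnt (nums : List Int) : solve nums = cnt nums := by
  unfold solve
  rw [← List.foldl_map, ← PySem.List.enumerate_eq_map_pyRange nums 0]
  exact (A_invariant nums).1

theorem solve_alt_eq_cnt (nums : List Int) : solve_alt nums = cnt nums := by
  unfold solve_alt
  rw [PySem.List.pyRange_one]
  simp only [PySem.List.len_eq, Int.sub_zero, Int.toNat_natCast, zero_add]
  rw [List.foldl_map]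
  have hb : ∀ (a : Int) (k : Nat), k ∈ List.range nums.length →
      ((PySem.List.slice nums (some (k : Int)) none).foldl stepB (0, 0, a)).2.2
        = a + gp (nums.drop k) := by
    intro a k _
    rw [PySem.List.slice_from_natCast, stepB_fold]
  rw [PySem.List.foldl_congr_mem _ _ (fun a k => a + gp (nums.drop k)) _ hb,
    PySem.List.foldl_add]
  simp [cnt]

-- ===== VERDICT (by name: the statement is the Claim_ definition above) =====
theorem solve_spec : Claim_equal_solve := by
  intro nums _
  unfold Spec_solve
  rw [solve_eq_cnt, solve_alt_eq_cnt]
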